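-- pv_equiv track=rewrite | github.com/fossasia/eventyay | app/eventyay/base/services/telemetry.py | get_count_bucket
-- ===== SOURCE A (Python) =====
-- def get_count_bucket(count: int) -> str:
--     """
--     Convert a numeric count into a privacy-preserving bucket string.
--
--     Examples:
--         0 -> "0"
--         5 -> "1-10"
--         75 -> "51-100"
--         10000 -> "5000+"
--     """
--     if count == 0:
--         return "0"
--
--     # Buckets: 1-10, 11-50, 51-100, 101-500, 501-1000, 1001-5000, 5000+
--     bucket_ranges = [
--         (1, 10),
--         (11, 50),
--         (51, 100),
--         (101, 500),
--         (501, 1000),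
--         (1001, 5000),
--     ]
--
--     for low, high in bucket_ranges:
--         if count <= high:
--             return f"{low}-{high}"
--
--     return "5000+"
-- ===== SOURCE B (Python) =====
-- def _bisect_left(a, x, lo, hi):
--     while lo < hi:
--         mid = (lo + hi) // 2
--         if a[mid] < x:
--             lo = mid + 1
--         else:
--             hi = mid
--     return lo
--
-- _THRESHOLDS = [10, 50, 100, 500, 1000, 5000]
-- _LABELS = ["1-10", "11-50", "51-100", "101-500", "501-1000", "1001-5000", "5000+"]
--
-- def get_count_bucket(count: int) -> str:
--     if count == 0:
--         return "0"
--     return _LABELS[_bisect_left(_THRESHOLDS, count, 0, len(_THRESHOLDS))]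
-- ===== Notes on version B (the rewrite author's own statement) =====
-- stated objective: idiomatic
-- what changed: Replaced the linear scan over (low,high) range pairs with a binary search (bisect_left) over a precomputed threshold list indexing into a parallel label table.
import Mathlib
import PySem

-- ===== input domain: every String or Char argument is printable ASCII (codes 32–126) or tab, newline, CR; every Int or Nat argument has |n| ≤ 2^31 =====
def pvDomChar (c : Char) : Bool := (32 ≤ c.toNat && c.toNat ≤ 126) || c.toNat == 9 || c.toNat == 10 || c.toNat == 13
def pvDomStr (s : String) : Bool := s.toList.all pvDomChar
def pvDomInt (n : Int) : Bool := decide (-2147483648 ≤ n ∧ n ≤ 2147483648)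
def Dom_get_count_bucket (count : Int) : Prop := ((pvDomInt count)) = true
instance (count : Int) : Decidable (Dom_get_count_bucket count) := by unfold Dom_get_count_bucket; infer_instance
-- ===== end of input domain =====

-- B replaces A's linear scan over (low, high) range pairs by a binary search over a
-- precomputed threshold list indexing a parallel label table (objective: idiomatic).

-- ===== PORT A =====
def get_count_bucket_loop (ranges : List (Int × Int)) (count : Int) : String :=
  match ranges with
  | [] => "5000+"
  | (low, high) :: rest =>
    if count ≤ high then PySem.Int.toStr low ++ "-" ++ PySem.Int.toStr high
    else get_count_bucket_loop rest count

def get_count_bucket (count : Int) : String :=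
  if count = 0 then "0"
  else get_count_bucket_loop [(1, 10), (11, 50), (51, 100), (101, 500), (501, 1000), (1001, 5000)] count

-- ===== PORT B =====
-- fuel-based port of Source B's `while lo < hi` loop; fuel = hi - lo bounds the iteration count
def pvBisectGo (a : List Int) (x : Int) : Nat → Nat → Nat → Nat
  | 0, lo, _ => lo
  | fuel + 1, lo, hi =>
    if lo < hi then
      let mid := (lo + hi) / 2
      if a.getD mid 0 < x then pvBisectGo a x fuel (mid + 1) hi
      else pvBisectGo a x fuel lo mid
    else lo

def pvBisectLeft (a : List Int) (x : Int) (lo hi : Nat) : Nat :=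
  pvBisectGo a x (hi - lo) lo hi

def pvThresholds : List Int := [10, 50, 100, 500, 1000, 5000]
def pvLabels : List String := ["1-10", "11-50", "51-100", "101-500", "501-1000", "1001-5000", "5000+"]

def get_count_bucket_alt (count : Int) : String :=
  if count = 0 then "0"
  else pvLabels.getD (pvBisectLeft pvThresholds count 0 pvThresholds.length) ""

-- ===== PRECONDITION & SPEC =====
def Spec_get_count_bucket (count : Int) (out : String) : Prop := out = get_count_bucket_alt count
instance (count : Int) (out : String) : Decidable (Spec_get_count_bucket count out) := by unfold Spec_get_count_bucket; infer_instance

-- ===== CLAIM (what is proved, stated in full; the proofs are below) =====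
def Claim_equal_get_count_bucket : Prop := ∀ (count : Int), Dom_get_count_bucket count → Spec_get_count_bucket count (get_count_bucket count)

-- ===== LEMMAS AND PROOFS =====
lemma pvBisect_eval (count : Int) :
    pvBisectLeft pvThresholds count 0 pvThresholds.length =
      if (5000 : Int) < count then 6
      else if (1000 : Int) < count then 5
      else if (500 : Int) < count then 4
      else if (100 : Int) < count then 3
      else if (50 : Int) < count then 2
      else if (10 : Int) < count then 1
      else 0 := by
  simp only [pvThresholds, pvBisectLeft]
  norm_num
  simp only [pvBisectGo]
  norm_num
  split_ifs <;> omega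

-- ===== VERDICT (by name: the statement is the Claim_ definition above) =====
theorem get_count_bucket_spec : Claim_equal_get_count_bucket := by
  intro count _
  unfold Spec_get_count_bucket get_count_bucket get_count_bucket_alt
  rw [pvBisect_eval]
  simp only [get_count_bucket_loop, pvLabels]
  split_ifs <;> first | rfl | omega
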